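-- pv_equiv track=rewrite | github.com/IDevelopRandomThings/FloodPredictor | src/Backend/flood_pipeline.py | map_weather_to_rain_level
-- ===== SOURCE A (Python) =====
-- def map_weather_to_rain_level(desc: str) -> int:
--     d = desc.lower()
--     if any(x in d for x in ["petir", "thunder", "badai"]):
--         return 4
--     if any(x in d for x in ["hujan lebat", "hujan deras"]):
--         return 3
--     if "hujan sedang" in d:
--         return 2
--     if any(x in d for x in ["hujan ringan", "gerimis"]):
--         return 1
--     return 0
-- ===== SOURCE B (Python) =====
-- TABLE = [
--     (["petir", "thunder", "badai"], 4),
--     (["hujan lebat", "hujan deras"], 3),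
--     (["hujan sedang"], 2),
--     (["hujan ringan", "gerimis"], 1),
-- ]
--
-- def map_weather_to_rain_level(desc: str) -> int:
--     d = desc.lower()
--     levels = [lvl for kws, lvl in TABLE if any(k in d for k in kws)]
--     return max(levels, default=0)
-- ===== Notes on version B (the rewrite author's own statement) =====
-- stated objective: simpler
-- what changed: Replaces the ordered short-circuit if-chain by a declarative keyword table: collect every matching level and return their maximum (default 0), correct because A's branch order is level-descending.
import Mathlib
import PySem

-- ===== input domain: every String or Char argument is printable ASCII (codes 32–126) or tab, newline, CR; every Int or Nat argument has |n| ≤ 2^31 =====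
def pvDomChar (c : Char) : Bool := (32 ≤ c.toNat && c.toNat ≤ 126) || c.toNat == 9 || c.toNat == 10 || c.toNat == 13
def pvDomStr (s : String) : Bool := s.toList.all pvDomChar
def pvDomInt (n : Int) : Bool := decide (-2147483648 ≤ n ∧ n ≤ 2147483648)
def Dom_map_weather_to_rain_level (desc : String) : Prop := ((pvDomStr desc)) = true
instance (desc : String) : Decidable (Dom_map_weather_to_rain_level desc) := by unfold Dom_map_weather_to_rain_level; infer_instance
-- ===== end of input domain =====

-- B replaces A's ordered if-chain by a keyword table with a collect-all-matches-then-max reduction (objective: simpler).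


-- ===== PORT A =====
def map_weather_to_rain_level (desc : String) : Int :=
  let d := PySem.Str.lower desc
  if ["petir", "thunder", "badai"].any (fun x => PySem.Str.isIn x d) then 4
  else if ["hujan lebat", "hujan deras"].any (fun x => PySem.Str.isIn x d) then 3
  else if PySem.Str.isIn "hujan sedang" d then 2
  else if ["hujan ringan", "gerimis"].any (fun x => PySem.Str.isIn x d) then 1
  else 0

-- ===== PORT B =====
def pvTable : List (List String × Int) :=
  [(["petir", "thunder", "badai"], 4),
   (["hujan lebat", "hujan deras"], 3),
   (["hujan sedang"], 2),
   (["hujan ringan", "gerimis"], 1)]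

def map_weather_to_rain_level_alt (desc : String) : Int :=
  let d := PySem.Str.lower desc
  let levels := (pvTable.filter (fun p => p.1.any (fun k => PySem.Str.isIn k d))).map Prod.snd
  (PySem.List.max? levels (fun x => x)).getD 0

-- ===== PRECONDITION & SPEC =====
def Spec_map_weather_to_rain_level (desc : String) (out : Int) : Prop := out = map_weather_to_rain_level_alt desc
instance (desc : String) (out : Int) : Decidable (Spec_map_weather_to_rain_level desc out) := by unfold Spec_map_weather_to_rain_level; infer_instance

-- ===== CLAIM (what is proved, stated in full; the proofs are below) =====
def Claim_equal_map_weather_to_rain_level : Prop := ∀ (desc : String), Dom_map_weather_to_rain_level desc → Spec_map_weather_to_rain_level desc (map_weather_to_rain_level desc)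

-- ===== LEMMAS AND PROOFS =====

-- ===== VERDICT (by name: the statement is the Claim_ definition above) =====
theorem map_weather_to_rain_level_spec : Claim_equal_map_weather_to_rain_level := by
  intro desc _
  unfold Spec_map_weather_to_rain_level map_weather_to_rain_level map_weather_to_rain_level_alt pvTable
  simp only [List.any_cons, List.any_nil, List.filter_cons, List.filter_nil,
    Bool.or_false]
  generalize PySem.Str.isIn "petir" (PySem.Str.lower desc) = b1
  generalize PySem.Str.isIn "thunder" (PySem.Str.lower desc) = b2
  generalize PySem.Str.isIn "badai" (PySem.Str.lower desc) = b3
  generalize PySem.Str.isIn "hujan lebat" (PySem.Str.lower desc) = b4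
  generalize PySem.Str.isIn "hujan deras" (PySem.Str.lower desc) = b5
  generalize PySem.Str.isIn "hujan sedang" (PySem.Str.lower desc) = b6
  generalize PySem.Str.isIn "hujan ringan" (PySem.Str.lower desc) = b7
  generalize PySem.Str.isIn "gerimis" (PySem.Str.lower desc) = b8
  revert b1 b2 b3 b4 b5 b6 b7 b8
  decide
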